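-- pv_equiv track=rewrite | github.com/arnoldaz/advent-of-code | 2015/17.py | find_different_container_combinations
-- ===== SOURCE A (Python) =====
-- def find_different_container_combinations(current_liters: int, target_liters: int, left_containers: list[int], current_container_count: int, target_container_count: int) -> int:
--     if current_liters == target_liters:
--         if target_container_count != -1:
--             return int(current_container_count == target_container_count)
--
--         return 1
--
--     if current_liters > target_liters:
--         return 0
--
--     if not left_containers:
--         return 0
--
--     return sum(
--         find_different_container_combinations(current_liters + container, target_liters, left_containers[i+1:], current_container_count + 1, target_container_count)
--         for i, container in enumerate(left_containers)
--     )
-- ===== SOURCE B (Python) =====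
-- def find_different_container_combinations(current_liters: int, target_liters: int, left_containers: list[int], current_container_count: int, target_container_count: int) -> int:
--     if current_liters == target_liters:
--         if target_container_count != -1:
--             return int(current_container_count == target_container_count)
--         return 1
--     if current_liters > target_liters:
--         return 0
--     # DP over weighted states (partial_sum, containers_used) -> number of ways,
--     # processing each container once with take/skip transitions.
--     finished = 0
--     active = {(current_liters, current_container_count): 1}
--     for c in left_containers:
--         new_active = dict(active)  # skip this container
--         for (s, k), w in active.items():
--             s2 = s + c
--             if s2 == target_liters:
--                 if target_container_count == -1 or k + 1 == target_container_count:
--                     finished += w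
--             elif s2 < target_liters:
--                 key = (s2, k + 1)
--                 new_active[key] = new_active.get(key, 0) + w
--         active = new_active
--     return finished
-- ===== Notes on version B (the rewrite author's own statement) =====
-- stated objective: alternative
-- what changed: Replaces A's recursion that branches on every remaining container with a single left-to-right pass keeping a dict of weighted (partial sum, container count) states plus a finished-count accumulator.
import Mathlib
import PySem

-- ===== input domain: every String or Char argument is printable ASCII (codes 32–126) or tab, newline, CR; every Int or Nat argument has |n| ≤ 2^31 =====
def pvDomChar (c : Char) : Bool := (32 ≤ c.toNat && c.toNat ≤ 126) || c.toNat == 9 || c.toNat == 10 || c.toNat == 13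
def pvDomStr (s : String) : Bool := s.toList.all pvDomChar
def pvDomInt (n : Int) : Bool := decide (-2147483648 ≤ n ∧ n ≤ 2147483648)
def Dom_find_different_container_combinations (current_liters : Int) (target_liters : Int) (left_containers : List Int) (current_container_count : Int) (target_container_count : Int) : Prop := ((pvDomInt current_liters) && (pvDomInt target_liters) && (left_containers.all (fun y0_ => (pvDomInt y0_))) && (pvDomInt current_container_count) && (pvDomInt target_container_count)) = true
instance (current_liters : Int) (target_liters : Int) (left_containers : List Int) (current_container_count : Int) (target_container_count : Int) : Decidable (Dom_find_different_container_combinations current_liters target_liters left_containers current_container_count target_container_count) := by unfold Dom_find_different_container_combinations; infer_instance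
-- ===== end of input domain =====

-- B re-implements A's recursive subset search as one left-to-right pass keeping a dict of weighted (partial sum, container count) states (alternative algorithm).


-- ===== PORT A =====
-- Port of A: literal recursion over `enumerate`, recursing on the slice after each index.
def find_different_container_combinations (current_liters : Int) (target_liters : Int) (left_containers : List Int) (current_container_count : Int) (target_container_count : Int) : Int :=
  if current_liters = target_liters then
    if target_container_count ≠ -1 then
      (if current_container_count = target_container_count then 1 else 0)
    else 1
  else if current_liters > target_liters then 0
  else if left_containers.isEmpty then 0
  else ((PySem.List.enumerate left_containers 0).attach.map (fun p =>
      find_different_container_combinations (current_liters + p.1.2) target_liters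
        (PySem.List.slice left_containers (some (p.1.1 + 1)) none)
        (current_container_count + 1) target_container_count)).sum
termination_by left_containers.length
decreasing_by
  obtain ⟨k, hk, hp⟩ := (PySem.List.mem_enumerate_iff _ _ _).mp p.2
  have h1 : p.1.1 + 1 = ((k + 1 : Nat) : Int) := by rw [hp]; push_cast; ring
  rw [h1, PySem.List.slice_from_natCast]
  simp only [List.length_drop]
  omega

-- ===== PORT B =====
-- One container step of B's DP: fold over the current weighted states (sum, count) -> ways,
-- starting from a copy of the dict (the "skip" transitions), adding "take" transitions.
def pvStepB (target_liters target_container_count c : Int)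
    (st : Int × PySem.Dict (Int × Int) Int) : Int × PySem.Dict (Int × Int) Int :=
  st.2.items.foldl (fun acc p =>
    let s2 := p.1.1 + c
    if s2 = target_liters then
      (if target_container_count = -1 ∨ p.1.2 + 1 = target_container_count then (acc.1 + p.2, acc.2) else acc)
    else if s2 < target_liters then
      (acc.1, acc.2.insert (s2, p.1.2 + 1) (acc.2.getD (s2, p.1.2 + 1) 0 + p.2))
    else acc) (st.1, st.2)

def find_different_container_combinations_alt (current_liters : Int) (target_liters : Int) (left_containers : List Int) (current_container_count : Int) (target_container_count : Int) : Int :=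
  if current_liters = target_liters then
    if target_container_count ≠ -1 then
      (if current_container_count = target_container_count then 1 else 0)
    else 1
  else if current_liters > target_liters then 0
  else (left_containers.foldl (fun st c => pvStepB target_liters target_container_count c st)
        (0, PySem.Dict.empty.insert (current_liters, current_container_count) 1)).1

-- ===== PRECONDITION & SPEC =====
def Spec_find_different_container_combinations (current_liters : Int) (target_liters : Int) (left_containers : List Int) (current_container_count : Int) (target_container_count : Int) (out : Int) : Prop := out = find_different_container_combinations_alt current_liters target_liters left_containers current_container_count target_container_count
instance (current_liters : Int) (target_liters : Int) (left_containers : List Int) (current_container_count : Int) (target_container_count : Int) (out : Int) : Decidable (Spec_find_different_container_combinations current_liters target_liters left_containers current_container_count target_container_count out) := by unfold Spec_find_different_container_combinations; infer_instance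

-- ===== CLAIM (what is proved, stated in full; the proofs are below) =====
def Claim_equal_find_different_container_combinations : Prop := ∀ (current_liters : Int) (target_liters : Int) (left_containers : List Int) (current_container_count : Int) (target_container_count : Int), Dom_find_different_container_combinations current_liters target_liters left_containers current_container_count target_container_count → Spec_find_different_container_combinations current_liters target_liters left_containers current_container_count target_container_count (find_different_container_combinations current_liters target_liters left_containers current_container_count target_container_count)

-- ===== LEMMAS AND PROOFS =====
-- weighted sum of an items list under a valuation of the keys
def pvWsum (L : List ((Int × Int) × Int)) (f : Int × Int → Int) : Int :=
  (L.map (fun p => p.2 * f p.1)).sum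

theorem pvWsum_nil (f : Int × Int → Int) : pvWsum [] f = 0 := rfl

theorem pvWsum_cons (a : (Int × Int) × Int) (L : List ((Int × Int) × Int)) (f : Int × Int → Int) :
    pvWsum (a :: L) f = a.2 * f a.1 + pvWsum L f := by simp [pvWsum]

theorem pvWsum_append (L M : List ((Int × Int) × Int)) (f : Int × Int → Int) :
    pvWsum (L ++ M) f = pvWsum L f + pvWsum M f := by simp [pvWsum]

theorem pvWsum_eq_zero (L : List ((Int × Int) × Int)) (f : Int × Int → Int)
    (h : ∀ p ∈ L, f p.1 = 0) : pvWsum L f = 0 := by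
  induction L with
  | nil => rfl
  | cons a L ih =>
    rw [pvWsum_cons, h a List.mem_cons_self, ih (fun p hp => h p (List.mem_cons_of_mem a hp))]
    ring

theorem pv_wsum_replace (key : Int × Int) (v : Int) (f : Int × Int → Int) :
    ∀ (L : List ((Int × Int) × Int)) (w0 : Int), (L.map Prod.fst).Nodup → (key, w0) ∈ L →
    pvWsum (L.map (fun p => if p.1 == key then (key, v) else p)) f
      = pvWsum L f - w0 * f key + v * f key := by
  intro L
  induction L with
  | nil => intro w0 _ hm; simp at hm
  | cons a L ih =>
    intro w0 hnd hm
    simp only [List.map_cons, List.nodup_cons] at hnd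
    rcases List.mem_cons.mp hm with h | h
    · have ha1 : a.1 = key := by rw [← h]
      have htail : L.map (fun p => if p.1 == key then (key, v) else p) = L := by
        conv_rhs => rw [← List.map_id L]
        apply List.map_congr_left
        intro p hp
        have hne : p.1 ≠ key := by
          intro hk
          apply hnd.1
          rw [ha1, ← hk]
          exact List.mem_map_of_mem hp
        simp [hne]
      have hw0 : w0 = a.2 := by rw [← h]
      simp only [List.map_cons, ha1, beq_self_eq_true, if_pos]
      rw [pvWsum_cons, pvWsum_cons, htail, hw0, ha1]
      simp; ring
    · have hmemk : key ∈ L.map Prod.fst := by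
        have := List.mem_map_of_mem (f := Prod.fst) h; exact this
      have hne : a.1 ≠ key := fun hk => hnd.1 (hk ▸ hmemk)
      simp only [List.map_cons, beq_eq_false_iff_ne.mpr hne, Bool.false_eq_true,
        if_false]
      rw [pvWsum_cons, pvWsum_cons, ih w0 hnd.2 h]
      ring

theorem pv_wsum_insert (d : PySem.Dict (Int × Int) Int) (key : Int × Int) (w : Int)
    (f : Int × Int → Int) (hnd : d.keys.Nodup) :
    pvWsum (d.insert key (d.getD key 0 + w)).items f = pvWsum d.items f + w * f key := by
  by_cases hc : d.contains key = true
  · obtain ⟨p, hp, hp1⟩ := List.mem_map.mp ((PySem.Dict.contains_iff_mem_keys d key).mp hc)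
    have hmem : (key, p.2) ∈ d.items := by rw [← hp1]; exact hp
    have hget : d.getD key 0 = p.2 := PySem.Dict.getD_of_mem_items d hmem hnd 0
    rw [PySem.Dict.items_insert_of_contains d _ hc,
      pv_wsum_replace key _ f d.items p.2 hnd hmem, hget]
    ring
  · have hc' : d.contains key = false := by
      cases h : d.contains key
      · rfl
      · exact absurd h hc
    rw [PySem.Dict.items_insert_of_not_contains d _ hc', pvWsum_append,
      PySem.Dict.getD_of_not_contains d 0 hc', pvWsum_cons, pvWsum_nil]
    ring

theorem pv_map_attach {α β : Type} (l : List α) (F : α → β) :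
    (l.attach.map (fun p => F p.1)) = l.map F := by simp

-- A's recursive case written as a sum over the index range
theorem pv_A_body (cur t cnt tc : Int) (l : List Int) (h1 : ¬ cur = t) (h2 : ¬ cur > t) :
    find_different_container_combinations cur t l cnt tc
      = ((List.range l.length).map (fun k =>
          find_different_container_combinations (cur + l.getD k 0) t (l.drop (k + 1)) (cnt + 1) tc)).sum := by
  rw [find_different_container_combinations]
  simp only [if_neg h1, if_neg h2]
  cases l with
  | nil => simp
  | cons c tl =>
    simp only [List.isEmpty_cons, Bool.false_eq_true, if_false]
    rw [pv_map_attach (PySem.List.enumerate (c :: tl)) (fun q =>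
      find_different_container_combinations (cur + q.2) t
        (PySem.List.slice (c :: tl) (some (q.1 + 1)) none) (cnt + 1) tc)]
    rw [PySem.List.enumerate_eq_map_pyRange _ 0]
    have hlen : PySem.List.len (c :: tl) = ((c :: tl).length : Int) := rfl
    rw [hlen, PySem.List.pyRange_zero_natCast]
    simp only [List.map_map]
    apply congrArg
    apply List.map_congr_left
    intro k hk
    simp only [Function.comp]
    have hgd : PySem.List.pyGetD (c :: tl) (k : Int) 0 = (c :: tl).getD k 0 :=
      PySem.List.pyGetD_natCast _ _ _
    have hsl : PySem.List.slice (c :: tl) (some ((k : Int) + 1)) none = (c :: tl).drop (k + 1) := by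
      have : ((k : Int) + 1) = ((k + 1 : Nat) : Int) := by push_cast; ring
      rw [this, PySem.List.slice_from_natCast]
    rw [hgd, hsl]

-- take/skip decomposition of A's recursion
theorem pv_take_skip (t tc cur cnt c : Int) (tl : List Int) (h : cur < t) :
    find_different_container_combinations cur t (c :: tl) cnt tc
      = find_different_container_combinations (cur + c) t tl (cnt + 1) tc
        + find_different_container_combinations cur t tl cnt tc := by
  have h1 : ¬ cur = t := by omega
  have h2 : ¬ cur > t := by omega
  rw [pv_A_body cur t cnt tc (c :: tl) h1 h2, pv_A_body cur t cnt tc tl h1 h2]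
  rw [List.length_cons, List.range_succ_eq_map]
  simp only [List.map_cons, List.sum_cons, List.map_map]
  simp only [List.getD_cons_zero, List.drop_succ_cons, List.drop_zero]
  apply congrArg (HAdd.hAdd (find_different_container_combinations (cur + c) t tl (cnt + 1) tc))
  refine congrArg List.sum (List.map_congr_left ?_)
  intro k hk
  simp [Function.comp, Nat.succ_eq_add_one]

def pvInnerFold (t tc c : Int) (L : List ((Int × Int) × Int)) (fin : Int)
    (na : PySem.Dict (Int × Int) Int) : Int × PySem.Dict (Int × Int) Int :=
  L.foldl (fun acc p =>
    let s2 := p.1.1 + c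
    if s2 = t then
      (if tc = -1 ∨ p.1.2 + 1 = tc then (acc.1 + p.2, acc.2) else acc)
    else if s2 < t then
      (acc.1, acc.2.insert (s2, p.1.2 + 1) (acc.2.getD (s2, p.1.2 + 1) 0 + p.2))
    else acc) (fin, na)

theorem pv_stepB_eq (t tc c : Int) (fin : Int) (act : PySem.Dict (Int × Int) Int) :
    pvStepB t tc c (fin, act) = pvInnerFold t tc c act.items fin act := rfl

theorem pvInnerFold_nil (t tc c : Int) (fin : Int) (na : PySem.Dict (Int × Int) Int) :
    pvInnerFold t tc c [] fin na = (fin, na) := rfl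

theorem pvInnerFold_cons (t tc c : Int) (p : (Int × Int) × Int) (L : List ((Int × Int) × Int))
    (fin : Int) (na : PySem.Dict (Int × Int) Int) :
    pvInnerFold t tc c (p :: L) fin na
      = if p.1.1 + c = t then
          (if tc = -1 ∨ p.1.2 + 1 = tc then pvInnerFold t tc c L (fin + p.2) na
           else pvInnerFold t tc c L fin na)
        else if p.1.1 + c < t then
          pvInnerFold t tc c L fin
            (na.insert (p.1.1 + c, p.1.2 + 1) (na.getD (p.1.1 + c, p.1.2 + 1) 0 + p.2))
        else pvInnerFold t tc c L fin na := by
  simp only [pvInnerFold, List.foldl_cons]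
  split_ifs with hA hB <;> rfl

theorem pv_inner (t tc c : Int) (rest : List Int) :
    ∀ (L : List ((Int × Int) × Int)) (fin : Int) (na : PySem.Dict (Int × Int) Int),
      na.keys.Nodup → (∀ q ∈ na.keys, q.1 < t) →
      ((pvInnerFold t tc c L fin na).1
          + pvWsum (pvInnerFold t tc c L fin na).2.items
              (fun q => find_different_container_combinations q.1 t rest q.2 tc)
        = fin + pvWsum na.items (fun q => find_different_container_combinations q.1 t rest q.2 tc)
            + (L.map (fun p => p.2 * find_different_container_combinations (p.1.1 + c) t rest (p.1.2 + 1) tc)).sum)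
      ∧ (pvInnerFold t tc c L fin na).2.keys.Nodup
      ∧ (∀ q ∈ (pvInnerFold t tc c L fin na).2.keys, q.1 < t) := by
  intro L
  induction L with
  | nil =>
    intro fin na hnd hlt
    refine ⟨?_, hnd, hlt⟩
    simp [pvInnerFold_nil]
  | cons p L ih =>
    intro fin na hnd hlt
    rw [pvInnerFold_cons]
    by_cases hA : p.1.1 + c = t
    · simp only [if_pos hA]
      have hbase : find_different_container_combinations (p.1.1 + c) t rest (p.1.2 + 1) tc
          = if tc = -1 ∨ p.1.2 + 1 = tc then 1 else 0 := by
        rw [find_different_container_combinations]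
        by_cases hm1 : tc = -1
        · simp [hA, hm1]
        · by_cases hk : p.1.2 + 1 = tc <;> simp [hA, hm1, hk]
      by_cases hcond : tc = -1 ∨ p.1.2 + 1 = tc
      · simp only [if_pos hcond]
        obtain ⟨he, hn, hl⟩ := ih (fin + p.2) na hnd hlt
        refine ⟨?_, hn, hl⟩
        rw [he]
        simp only [List.map_cons, List.sum_cons, hbase, if_pos hcond]
        ring
      · simp only [if_neg hcond]
        obtain ⟨he, hn, hl⟩ := ih fin na hnd hlt
        refine ⟨?_, hn, hl⟩
        rw [he]
        simp only [List.map_cons, List.sum_cons, hbase, if_neg hcond]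
        ring
    · simp only [if_neg hA]
      by_cases hB : p.1.1 + c < t
      · simp only [if_pos hB]
        have hnd' := PySem.Dict.nodup_keys_insert na (p.1.1 + c, p.1.2 + 1) (na.getD (p.1.1 + c, p.1.2 + 1) 0 + p.2) hnd
        have hlt' : ∀ q ∈ (na.insert (p.1.1 + c, p.1.2 + 1)
            (na.getD (p.1.1 + c, p.1.2 + 1) 0 + p.2)).keys, q.1 < t := by
          intro q hq
          rcases (PySem.Dict.mem_keys_insert na _ q _).mp hq with hq1 | hq2
          · rw [hq1]; exact hB
          · exact hlt q hq2
        obtain ⟨he, hn, hl⟩ := ih fin _ hnd' hlt'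
        refine ⟨?_, hn, hl⟩
        rw [he, pv_wsum_insert na _ p.2 _ hnd]
        simp only [List.map_cons, List.sum_cons]
        ring
      · simp only [if_neg hB]
        have hzero : find_different_container_combinations (p.1.1 + c) t rest (p.1.2 + 1) tc = 0 := by
          rw [find_different_container_combinations]
          have hgt : p.1.1 + c > t := by omega
          simp [hA, hgt]
        obtain ⟨he, hn, hl⟩ := ih fin na hnd hlt
        refine ⟨?_, hn, hl⟩
        rw [he]
        simp only [List.map_cons, List.sum_cons, hzero]
        ring

theorem pv_outer (t tc : Int) :
    ∀ (l : List Int) (fin : Int) (act : PySem.Dict (Int × Int) Int),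
      act.keys.Nodup → (∀ q ∈ act.keys, q.1 < t) →
      (l.foldl (fun st c => pvStepB t tc c st) (fin, act)).1
        = fin + pvWsum act.items (fun q => find_different_container_combinations q.1 t l q.2 tc) := by
  intro l
  induction l with
  | nil =>
    intro fin act hnd hlt
    rw [List.foldl_nil]
    have : pvWsum act.items (fun q => find_different_container_combinations q.1 t [] q.2 tc) = 0 := by
      apply pvWsum_eq_zero
      intro p hp
      have hp1 : p.1.1 < t := hlt p.1 (PySem.Dict.mem_keys_of_mem_items act hp)
      rw [find_different_container_combinations]
      have h1 : ¬ p.1.1 = t := by omega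
      have h2 : ¬ p.1.1 > t := by omega
      simp [h1, h2]
    rw [this]; ring
  | cons c l ih =>
    intro fin act hnd hlt
    rw [List.foldl_cons]
    have hsplit : pvWsum act.items
        (fun q => find_different_container_combinations q.1 t (c :: l) q.2 tc)
        = (act.items.map (fun p =>
            p.2 * find_different_container_combinations (p.1.1 + c) t l (p.1.2 + 1) tc)).sum
          + pvWsum act.items (fun q => find_different_container_combinations q.1 t l q.2 tc) := by
      unfold pvWsum
      rw [← PySem.List.sum_map_add_int]
      apply congrArg
      apply List.map_congr_left
      intro p hp
      have hp1 : p.1.1 < t := hlt p.1 (PySem.Dict.mem_keys_of_mem_items act hp)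
      dsimp only
      rw [pv_take_skip t tc p.1.1 p.1.2 c l hp1]
      ring
    rw [pv_stepB_eq]
    obtain ⟨he, hn, hl⟩ := pv_inner t tc c l act.items fin act hnd hlt
    have hih := ih (pvInnerFold t tc c act.items fin act).1 (pvInnerFold t tc c act.items fin act).2 hn hl
    rw [Prod.mk.eta] at hih
    rw [hsplit, hih]
    omega

-- ===== VERDICT (by name: the statement is the Claim_ definition above) =====
theorem find_different_container_combinations_spec : Claim_equal_find_different_container_combinations := by
  intro cur t l cnt tc _
  unfold Spec_find_different_container_combinations
  unfold find_different_container_combinations_alt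
  by_cases h1 : cur = t
  · rw [find_different_container_combinations]; simp [h1]
  · by_cases h2 : cur > t
    · rw [find_different_container_combinations]; simp [h1, h2]
    · have hlt : cur < t := by omega
      simp only [if_neg h1, if_neg h2]
      have hnd : (PySem.Dict.empty.insert (cur, cnt) (1:Int)).keys.Nodup :=
        PySem.Dict.nodup_keys_insert _ _ _ PySem.Dict.nodup_keys_empty
      have hkeys : ∀ q ∈ (PySem.Dict.empty.insert (cur, cnt) (1:Int)).keys, q.1 < t := by
        intro q hq
        rcases (PySem.Dict.mem_keys_insert _ _ q _).mp hq with hq1 | hq2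
        · rw [hq1]; exact hlt
        · simp [PySem.Dict.empty] at hq2
      rw [pv_outer t tc l 0 _ hnd hkeys]
      have hitems : (PySem.Dict.empty.insert (cur, cnt) (1:Int)).items = [((cur, cnt), 1)] := by
        rw [PySem.Dict.items_insert_of_not_contains _ _ (PySem.Dict.contains_empty _)]
        rfl
      rw [hitems, pvWsum_cons, pvWsum_nil]
      ring
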